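-- pv_equiv track=rewrite | github.com/sankaranarayanan/MisconfigGuard | permission_analyzer.py | suggest_roles
-- ===== SOURCE A (Python) =====
-- from typing import Dict, List, Optional
--
-- _ROLE_ALTERNATIVES: Dict[str, List[str]] = {
--     "Owner": [
--         "Contributor",
--         "Reader",
--         "User Access Administrator",  # only if IAM mgmt is truly required
--     ],
--     "User Access Administrator": [
--         "Reader",
--         "Contributor",
--     ],
--     "Co-Administrator": [
--         "Contributor",
--         "Reader",
--     ],
--     "Contributor": [
--         "Reader",
--         "Storage Blob Data Contributor",
--         "Virtual Machine Contributor",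
--         "Key Vault Secrets User",
--         "Network Contributor",
--         "SQL DB Contributor",
--     ],
--     "Network Contributor": [
--         "Reader",
--         "Network Watcher Contributor",
--     ],
--     "Storage Account Contributor": [
--         "Storage Blob Data Contributor",
--         "Storage Blob Data Reader",
--         "Storage Queue Data Contributor",
--     ],
--     "Virtual Machine Administrator Login": [
--         "Virtual Machine User Login",
--         "Virtual Machine Contributor",
--     ],
--     "Security Admin": [
--         "Security Reader",
--     ],
-- }
--
-- def suggest_roles(role: str, context_hint: str = "") -> List[str]:
--     """
--     Return up to 4 recommended least-privilege alternatives for *role*.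
--
--     *context_hint* is optional text (e.g., identity name or resource type)
--     used to surface the most contextually relevant alternatives first.
--     """
--     alternatives = list(_ROLE_ALTERNATIVES.get(role, ["Reader"]))
--     if context_hint:
--         hint = context_hint.lower().split()
--         prioritised = [a for a in alternatives
--                        if any(kw in a.lower() for kw in hint)]
--         rest        = [a for a in alternatives if a not in prioritised]
--         alternatives = prioritised + rest
--     return alternatives[:4]
-- ===== SOURCE B (Python) =====
-- from typing import Dict, List, Tuple
--
-- _ROLE_ALTERNATIVES: Dict[str, List[str]] = {
--     "Owner": [
--         "Contributor",
--         "Reader",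
--         "User Access Administrator",
--     ],
--     "User Access Administrator": [
--         "Reader",
--         "Contributor",
--     ],
--     "Co-Administrator": [
--         "Contributor",
--         "Reader",
--     ],
--     "Contributor": [
--         "Reader",
--         "Storage Blob Data Contributor",
--         "Virtual Machine Contributor",
--         "Key Vault Secrets User",
--         "Network Contributor",
--         "SQL DB Contributor",
--     ],
--     "Network Contributor": [
--         "Reader",
--         "Network Watcher Contributor",
--     ],
--     "Storage Account Contributor": [
--         "Storage Blob Data Contributor",
--         "Storage Blob Data Reader",
--         "Storage Queue Data Contributor",
--     ],
--     "Virtual Machine Administrator Login": [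
--         "Virtual Machine User Login",
--         "Virtual Machine Contributor",
--     ],
--     "Security Admin": [
--         "Security Reader",
--     ],
-- }
--
--
-- def _partition_by_hint(hint: List[str], items: List[str]) -> Tuple[List[str], List[str]]:
--     """Recursively split *items* (order-preserving) into (hint matches, non-matches)."""
--     if not items:
--         return [], []
--     head, tail = items[0], items[1:]
--     yes, no = _partition_by_hint(hint, tail)
--     if any(kw in head.lower() for kw in hint):
--         return [head] + yes, no
--     return yes, [head] + no
--
--
-- def suggest_roles(role: str, context_hint: str = "") -> List[str]:
--     """Return up to 4 recommended least-privilege alternatives for *role*,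
--     hint-matching entries first (one recursive partition, no membership scan)."""
--     alternatives = _ROLE_ALTERNATIVES.get(role, ["Reader"])
--     if not context_hint:
--         return alternatives[:4]
--     yes, no = _partition_by_hint(context_hint.lower().split(), alternatives)
--     return (yes + no)[:4]
-- ===== Notes on version B (the rewrite author's own statement) =====
-- stated objective: alternative
-- what changed: Replaces A's two list-comprehension filter passes plus the membership scan against the prioritised list with a single recursive order-preserving partition of the alternatives into hint matches and non-matches.
import Mathlib
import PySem

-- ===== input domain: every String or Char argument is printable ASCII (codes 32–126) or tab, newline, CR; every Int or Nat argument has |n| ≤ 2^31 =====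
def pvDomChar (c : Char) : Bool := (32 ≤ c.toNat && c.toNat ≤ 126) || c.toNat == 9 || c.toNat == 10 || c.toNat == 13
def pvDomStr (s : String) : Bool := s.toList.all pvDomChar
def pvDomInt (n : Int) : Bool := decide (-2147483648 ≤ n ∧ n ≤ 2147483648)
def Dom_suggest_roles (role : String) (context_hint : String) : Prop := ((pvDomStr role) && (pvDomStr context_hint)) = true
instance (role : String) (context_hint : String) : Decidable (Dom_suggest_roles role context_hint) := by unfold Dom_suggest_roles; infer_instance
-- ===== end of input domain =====

-- B replaces A's two filter passes + membership scan with one recursive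
-- order-preserving partition into hint matches and non-matches (alternative; same cost
-- on the constant-size alternatives list).

-- the module constant _ROLE_ALTERNATIVES (shared by both Pythons)
def roleAlternatives : PySem.Dict String (List String) := PySem.Dict.ofList [
  ("Owner", ["Contributor", "Reader", "User Access Administrator"]),
  ("User Access Administrator", ["Reader", "Contributor"]),
  ("Co-Administrator", ["Contributor", "Reader"]),
  ("Contributor", ["Reader", "Storage Blob Data Contributor", "Virtual Machine Contributor",
                   "Key Vault Secrets User", "Network Contributor", "SQL DB Contributor"]),
  ("Network Contributor", ["Reader", "Network Watcher Contributor"]),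
  ("Storage Account Contributor", ["Storage Blob Data Contributor", "Storage Blob Data Reader",
                                   "Storage Queue Data Contributor"]),
  ("Virtual Machine Administrator Login", ["Virtual Machine User Login", "Virtual Machine Contributor"]),
  ("Security Admin", ["Security Reader"])]

-- ===== PORT A =====
def suggest_roles (role : String) (context_hint : String) : List String :=
  let alternatives := roleAlternatives.getD role ["Reader"]
  let alternatives :=
    if context_hint ≠ "" then
      let hint := PySem.Str.split₀ (PySem.Str.lower context_hint)
      let prioritised := alternatives.filter
        (fun a => hint.any (fun kw => PySem.Str.isIn kw (PySem.Str.lower a)))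
      let rest := alternatives.filter (fun a => !(decide (a ∈ prioritised)))
      prioritised ++ rest
    else alternatives
  PySem.List.slice alternatives none (some 4)

-- ===== PORT B =====
-- recursive helper _partition_by_hint from Source B: split items into (matches, non-matches)
def partitionByHint (hint : List String) : List String → List String × List String
  | [] => ([], [])
  | head :: tail =>
    let (yes, no) := partitionByHint hint tail
    if hint.any (fun kw => PySem.Str.isIn kw (PySem.Str.lower head)) then
      ([head] ++ yes, no)
    else
      (yes, [head] ++ no)

def suggest_roles_alt (role : String) (context_hint : String) : List String :=
  let alternatives := roleAlternatives.getD role ["Reader"]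
  if context_hint = "" then
    PySem.List.slice alternatives none (some 4)
  else
    let p := partitionByHint (PySem.Str.split₀ (PySem.Str.lower context_hint)) alternatives
    PySem.List.slice (p.1 ++ p.2) none (some 4)

-- ===== PRECONDITION & SPEC =====
def Spec_suggest_roles (role : String) (context_hint : String) (out : List String) : Prop := out = suggest_roles_alt role context_hint
instance (role : String) (context_hint : String) (out : List String) : Decidable (Spec_suggest_roles role context_hint out) := by unfold Spec_suggest_roles; infer_instance

-- ===== CLAIM =====
def Claim_equal_suggest_roles : Prop := ∀ (role : String) (context_hint : String), Dom_suggest_roles role context_hint → Spec_suggest_roles role context_hint (suggest_roles role context_hint)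

-- ===== LEMMAS AND PROOFS =====

-- A's membership test against the prioritised list, taken over the very list it was
-- filtered from, is just the negated match predicate.
theorem filter_not_mem_filter {α : Type} [DecidableEq α] (l : List α) (q : α → Bool) :
    l.filter (fun a => !(decide (a ∈ l.filter q))) = l.filter (fun a => !q a) := by
  apply List.filter_congr
  intro a ha
  simp [List.mem_filter, ha]

-- the recursive partition is exactly the pair of filters, in input order
theorem partitionByHint_eq (hint : List String) (l : List String) :
    partitionByHint hint l
      = (l.filter (fun a => hint.any (fun kw => PySem.Str.isIn kw (PySem.Str.lower a))),
         l.filter (fun a => !(hint.any (fun kw => PySem.Str.isIn kw (PySem.Str.lower a))))) := by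
  induction l with
  | nil => simp [partitionByHint]
  | cons head tail ih =>
    simp only [partitionByHint, ih]
    rw [List.filter_cons, List.filter_cons]
    cases h : (hint.any fun kw => PySem.Str.isIn kw (PySem.Str.lower head)) <;> simp_all

theorem suggest_roles_eq (role context_hint : String) :
    suggest_roles role context_hint = suggest_roles_alt role context_hint := by
  unfold suggest_roles suggest_roles_alt
  by_cases h : context_hint = ""
  · simp [h]
  · simp only [h, ne_eq, not_false_eq_true, if_pos, if_neg]
    rw [filter_not_mem_filter, partitionByHint_eq]

-- ===== VERDICT =====
theorem suggest_roles_spec : Claim_equal_suggest_roles := by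
  intro role context_hint _
  unfold Spec_suggest_roles
  exact suggest_roles_eq role context_hint
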